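-- pv_equiv track=rewrite | github.com/DevPatel29/MILP-ACO_JPN48 | antColonyOptimization.py | uniqueTrail
-- ===== SOURCE A (Python) =====
-- def uniqueTrail(trail, trails):
-- 	for x in trails:
-- 		if(len(x) == len(trail)):
-- 			eq = True
-- 			for i in range(len(x)) :
-- 				if(x[i][0] != trail[i][0] or x[i][1] != trail[i][1]) :
-- 					eq = False
-- 					break
-- 			if(eq):
-- 				return False
-- 	return True
-- ===== SOURCE B (Python) =====
-- def uniqueTrail(trail, trails):
-- 	# Column-wise sieve: keep a pool of candidate suffixes and narrow it one
-- 	# trail position at a time; trail is non-unique iff a candidate survives.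
-- 	cands = [t for t in trails if len(t) == len(trail)]
-- 	for p in trail:
-- 		cands = [t[1:] for t in cands if t[0][0] == p[0] and t[0][1] == p[1]]
-- 		if not cands:
-- 			return True
-- 	return not cands
-- ===== Notes on version B (the rewrite author's own statement) =====
-- stated objective: alternative
-- what changed: Column-wise sieve: instead of comparing each stored trail element-by-element, B keeps a shrinking pool of candidate suffixes and filters the whole pool once per trail position, returning early when the pool empties.
import Mathlib
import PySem

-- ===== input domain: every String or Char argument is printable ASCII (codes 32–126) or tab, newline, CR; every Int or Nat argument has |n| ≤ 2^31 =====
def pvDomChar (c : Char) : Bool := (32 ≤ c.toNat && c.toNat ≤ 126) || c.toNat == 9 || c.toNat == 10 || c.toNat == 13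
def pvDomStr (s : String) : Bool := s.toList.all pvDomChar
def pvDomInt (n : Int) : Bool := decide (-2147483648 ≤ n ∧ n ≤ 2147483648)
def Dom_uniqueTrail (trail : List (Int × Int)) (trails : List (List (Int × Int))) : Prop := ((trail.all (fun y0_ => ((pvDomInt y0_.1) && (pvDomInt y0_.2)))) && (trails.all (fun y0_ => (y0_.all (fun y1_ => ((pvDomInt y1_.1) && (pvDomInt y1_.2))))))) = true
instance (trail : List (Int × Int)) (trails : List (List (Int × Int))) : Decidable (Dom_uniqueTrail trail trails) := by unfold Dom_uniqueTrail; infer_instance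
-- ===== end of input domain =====

-- B replaces A's per-trail element-by-element comparison with a column-wise sieve over a pool
-- of candidate suffixes (alternative decomposition, same cost).

-- ===== PORT A =====
-- inner 'for i in range(len(x))' loop with break; returns the final value of 'eq'
def uniqueTrailInner (x trail : List (Int × Int)) (i : Nat) : Bool :=
  if _h : i < x.length then
    match PySem.List.pyGet? x (i : Int), PySem.List.pyGet? trail (i : Int) with
    | some a, some b => if a.1 ≠ b.1 || a.2 ≠ b.2 then false else uniqueTrailInner x trail (i + 1)
    | _, _ => false   -- unreachable: only called when len(x) == len(trail)
  else true
termination_by x.length - i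

-- outer 'for x in trails' loop
def uniqueTrailGo (trail : List (Int × Int)) : List (List (Int × Int)) → Bool
  | [] => true
  | x :: rest =>
      if x.length = trail.length then
        if uniqueTrailInner x trail 0 then false else uniqueTrailGo trail rest
      else uniqueTrailGo trail rest

def uniqueTrail (trail : List (Int × Int)) (trails : List (List (Int × Int))) : Bool :=
  uniqueTrailGo trail trails

-- ===== PORT B =====
-- the 'for p in trail' loop: filter the candidate pool by the current position, early-return
-- True when it empties; after the loop return 'not cands'
def uniqueTrailSieve : List (Int × Int) → List (List (Int × Int)) → Bool
  | [], cands => cands.isEmpty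
  | p :: rest, cands =>
      let cands' := cands.filterMap (fun t =>
        match t with
        | q :: qs => if q.1 = p.1 ∧ q.2 = p.2 then some qs else none
        | [] => none)   -- unreachable in Python: candidates stay nonempty while positions remain
      if cands'.isEmpty then true else uniqueTrailSieve rest cands'

def uniqueTrail_alt (trail : List (Int × Int)) (trails : List (List (Int × Int))) : Bool :=
  uniqueTrailSieve trail (trails.filter (fun t => t.length == trail.length))

-- ===== PRECONDITION & SPEC =====
def Spec_uniqueTrail (trail : List (Int × Int)) (trails : List (List (Int × Int))) (out : Bool) : Prop := out = uniqueTrail_alt trail trails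
instance (trail : List (Int × Int)) (trails : List (List (Int × Int))) (out : Bool) : Decidable (Spec_uniqueTrail trail trails out) := by unfold Spec_uniqueTrail; infer_instance

-- ===== CLAIM (what is proved, stated in full; the proofs are below) =====
def Claim_equal_uniqueTrail : Prop := ∀ (trail : List (Int × Int)) (trails : List (List (Int × Int))), Dom_uniqueTrail trail trails → Spec_uniqueTrail trail trails (uniqueTrail trail trails)

-- ===== LEMMAS AND PROOFS =====
theorem uniqueTrailInner_iff (x trail : List (Int × Int)) (hlen : x.length = trail.length)
    (i : Nat) : uniqueTrailInner x trail i = true ↔ x.drop i = trail.drop i := by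
  by_cases h : i < x.length
  · have hx : i < x.length := h
    have ht : i < trail.length := hlen ▸ h
    rw [uniqueTrailInner]
    simp only [h, dif_pos]
    rw [PySem.List.pyGet?_natCast, PySem.List.pyGet?_natCast,
       List.getElem?_eq_getElem hx, List.getElem?_eq_getElem ht]
    have ih := uniqueTrailInner_iff x trail hlen (i + 1)
    have hdx : x.drop i = x[i] :: x.drop (i + 1) := (List.drop_eq_getElem_cons hx)
    have hdt : trail.drop i = trail[i] :: trail.drop (i + 1) := (List.drop_eq_getElem_cons ht)
    show (if (decide (x[i].1 ≠ trail[i].1) || decide (x[i].2 ≠ trail[i].2)) = true then false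
          else uniqueTrailInner x trail (i + 1)) = true ↔ x.drop i = trail.drop i
    by_cases heq : (decide (x[i].1 ≠ trail[i].1) || decide (x[i].2 ≠ trail[i].2)) = true
    · rw [if_pos heq]
      constructor
      · intro hf; exact absurd hf (by simp)
      · intro hd
        rw [hdx, hdt] at hd
        injection hd with h1 h2
        simp [h1] at heq
    · have hcomp : x[i] = trail[i] := by
        simp only [Bool.or_eq_true, decide_eq_true_eq, not_or, not_not] at heq
        exact Prod.ext heq.1 heq.2
      rw [if_neg heq, ih]
      constructor
      · intro hd; rw [hdx, hdt, hcomp, hd]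
      · intro hd
        rw [hdx, hdt] at hd
        exact (List.cons_eq_cons.mp hd).2
  · rw [uniqueTrailInner]
    simp only [h, dif_neg, not_false_iff]
    have hx : x.drop i = [] := List.drop_eq_nil_of_le (by omega)
    have ht : trail.drop i = [] := List.drop_eq_nil_of_le (by omega)
    simp [hx, ht]
termination_by x.length - i

theorem uniqueTrailGo_eq (trail : List (Int × Int)) (ts : List (List (Int × Int))) :
    uniqueTrailGo trail ts = !(decide (trail ∈ ts)) := by
  induction ts with
  | nil => simp [uniqueTrailGo]
  | cons x rest ih =>
      rw [uniqueTrailGo]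
      by_cases hlen : x.length = trail.length
      · rw [if_pos hlen]
        by_cases hin : uniqueTrailInner x trail 0 = true
        · have hx : x = trail := by
            have := (uniqueTrailInner_iff x trail hlen 0).mp hin
            simpa using this
          subst hx; simp [hin]
        · have hx : x ≠ trail := by
            intro hc
            exact hin ((uniqueTrailInner_iff x trail hlen 0).mpr (by simp [hc]))
          rw [if_neg hin, ih]
          simp [List.mem_cons, Ne.symm hx]
      · rw [if_neg hlen, ih]
        have hx : x ≠ trail := fun hc => hlen (by rw [hc])
        simp [List.mem_cons, Ne.symm hx]

theorem uniqueTrailSieve_eq (ps : List (Int × Int)) :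
    ∀ cands : List (List (Int × Int)), (∀ t ∈ cands, t.length = ps.length) →
    uniqueTrailSieve ps cands = !(decide (ps ∈ cands)) := by
  induction ps with
  | nil =>
      intro cands hlen
      cases cands with
      | nil => simp [uniqueTrailSieve]
      | cons c cs =>
          have hc : c = [] := List.eq_nil_of_length_eq_zero (hlen c (by simp))
          simp [uniqueTrailSieve, hc]
  | cons p rest ih =>
      intro cands hlen
      rw [uniqueTrailSieve]
      set f : List (Int × Int) → Option (List (Int × Int)) := (fun t =>
        match t with
        | q :: qs => if q.1 = p.1 ∧ q.2 = p.2 then some qs else none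
        | [] => none) with hf
      have hmem : ∀ r : List (Int × Int), r ∈ cands.filterMap f ↔ (p :: r) ∈ cands := by
        intro r
        rw [List.mem_filterMap]
        constructor
        · rintro ⟨t, htc, hft⟩
          cases t with
          | nil => simp [hf] at hft
          | cons q qs =>
              simp only [hf] at hft
              split_ifs at hft with hq
              · have hqp : q = p := Prod.ext hq.1 hq.2
                have hqs : qs = r := by injection hft
                rw [← hqp, ← hqs]; exact htc
        · intro hr
          exact ⟨p :: r, hr, by simp [hf]⟩
      have hlen' : ∀ t ∈ cands.filterMap f, t.length = rest.length := by
        intro t ht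
        rcases List.mem_filterMap.mp ht with ⟨u, huc, hfu⟩
        cases u with
        | nil => simp [hf] at hfu
        | cons q qs =>
            simp only [hf] at hfu
            split_ifs at hfu with hq
            · have hqt : qs = t := by injection hfu
              have h2 := hlen (q :: qs) huc
              simp only [List.length_cons] at h2
              rw [← hqt]
              omega
      by_cases he : (cands.filterMap f).isEmpty
      · rw [if_pos he]
        have : (p :: rest) ∉ cands := by
          intro hc
          have := (hmem rest).mpr hc
          rw [List.isEmpty_iff.mp he] at this
          simp at this
        simp [this]
      · rw [if_neg he, ih _ hlen']
        simp [hmem rest]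

-- ===== VERDICT (by name: the statement is the Claim_ definition above) =====
theorem uniqueTrail_spec : Claim_equal_uniqueTrail := by
  intro trail trails _hdom
  unfold Spec_uniqueTrail uniqueTrail uniqueTrail_alt
  rw [uniqueTrailGo_eq, uniqueTrailSieve_eq]
  · have : trail ∈ trails.filter (fun t => t.length == trail.length) ↔ trail ∈ trails := by
      simp [List.mem_filter]
    simp [this]
  · intro t ht
    have := (List.mem_filter.mp ht).2
    simpa using this
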